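-- pv_equiv track=rewrite | github.com/MathiasGretland/IN1000 | 2015/kode.py | trimZeros
-- ===== SOURCE A (Python) =====
-- def trimZeros(a):
--     forsteIndeks = 0
--     while forsteIndeks < len(a) and a[forsteIndeks] == 0:
--         forsteIndeks += 1
--
--     sisteIndeks = len(a) - 1
--     while sisteIndeks >= 0 and a[sisteIndeks] == 0:
--         sisteIndeks -= 1
--
--     return a[forsteIndeks:sisteIndeks + 1]
-- ===== SOURCE B (Python) =====
-- def trimZeros(a):
--     first = None
--     last = -1
--     for i, x in enumerate(a):
--         if not (x == 0):
--             if first is None: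
--                 first = i
--             last = i
--     if first is None:
--         return a[0:0]
--     return a[first:last + 1]
-- ===== Notes on version B (the rewrite author's own statement) =====
-- stated objective: alternative
-- what changed: Replaces A's two separate boundary scans (a while loop from the left and a while loop from the right) by a single forward pass that tracks the first and last non-zero indices, then slices once.
import Mathlib
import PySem

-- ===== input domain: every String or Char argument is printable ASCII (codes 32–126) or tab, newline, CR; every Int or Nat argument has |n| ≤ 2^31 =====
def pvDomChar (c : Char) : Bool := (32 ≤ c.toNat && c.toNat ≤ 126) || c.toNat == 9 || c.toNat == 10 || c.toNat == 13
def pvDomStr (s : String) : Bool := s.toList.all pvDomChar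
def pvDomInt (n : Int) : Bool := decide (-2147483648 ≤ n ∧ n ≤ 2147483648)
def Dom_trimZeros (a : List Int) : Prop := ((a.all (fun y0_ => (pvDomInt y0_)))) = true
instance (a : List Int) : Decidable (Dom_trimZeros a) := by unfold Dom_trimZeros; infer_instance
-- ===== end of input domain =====

-- B replaces A's two boundary while-loops (from the left and from the right) by one
-- forward pass tracking first/last non-zero indices; same behaviour, same cost.


-- ===== PORT A =====
-- while forsteIndeks < len(a) and a[forsteIndeks] == 0: forsteIndeks += 1
def trimZerosFirst (a : List Int) (i : Nat) : Nat :=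
  if h : i < a.length then
    if a[i] = 0 then trimZerosFirst a (i + 1) else i
  else i
termination_by a.length - i

-- while sisteIndeks >= 0 and a[sisteIndeks] == 0: sisteIndeks -= 1
def trimZerosLast (a : List Int) (j : Int) : Int :=
  if 0 ≤ j ∧ PySem.List.pyGetD a j 0 = 0 then trimZerosLast a (j - 1) else j
termination_by (j + 1).toNat
decreasing_by omega

def trimZeros (a : List Int) : List Int :=
  let forsteIndeks := trimZerosFirst a 0
  let sisteIndeks := trimZerosLast a ((a.length : Int) - 1)
  PySem.List.slice a (some (forsteIndeks : Int)) (some (sisteIndeks + 1))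

-- ===== PORT B =====
-- loop body: if not (x == 0): first = first if already set else i; last = i
def trimZerosStep (st : Option Int × Int) (p : Int × Int) : Option Int × Int :=
  if p.2 = 0 then st
  else ((match st.1 with | none => some p.1 | some f => some f), p.1)

def trimZeros_alt (a : List Int) : List Int :=
  let st := (PySem.List.enumerate a 0).foldl trimZerosStep (none, -1)
  match st.1 with
  | none => PySem.List.slice a (some 0) (some 0)
  | some first => PySem.List.slice a (some first) (some (st.2 + 1))

-- ===== PRECONDITION & SPEC =====
def Spec_trimZeros (a : List Int) (out : List Int) : Prop := out = trimZeros_alt a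
instance (a : List Int) (out : List Int) : Decidable (Spec_trimZeros a out) := by unfold Spec_trimZeros; infer_instance

-- ===== CLAIM (what is proved, stated in full; the proofs are below) =====
def Claim_equal_trimZeros : Prop := ∀ (a : List Int), Dom_trimZeros a → Spec_trimZeros a (trimZeros a)

-- ===== LEMMAS AND PROOFS =====

-- A's left scan stops after the leading zeros of a.drop i.
theorem trimZerosFirst_eq (a : List Int) (i : Nat) :
    trimZerosFirst a i = i + ((a.drop i).takeWhile (fun x => x = 0)).length := by
  rw [trimZerosFirst]
  split
  case isTrue h =>
    have hdrop : a.drop i = a[i] :: a.drop (i + 1) := List.drop_eq_getElem_cons h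
    split
    case isTrue hz =>
      rw [trimZerosFirst_eq a (i + 1), hdrop]
      simp [hz]
      omega
    case isFalse hz =>
      rw [hdrop]
      simp [hz]
  case isFalse h =>
    rw [List.drop_eq_nil_of_le (by omega)]
    simp
termination_by a.length - i

-- A's right scan stops below the trailing zeros of a.take (j+1).
theorem trimZerosLast_eq (a : List Int) (j : Int) (hj : j < (a.length : Int)) :
    trimZerosLast a j =
      j - (((a.take (j + 1).toNat).reverse.takeWhile (fun x => x = 0)).length : Int) := by
  rw [trimZerosLast]
  split
  case isTrue h =>
    obtain ⟨h0, hz⟩ := h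
    have hlt : j.toNat < a.length := by omega
    rw [PySem.List.pyGetD_eq_getElem a 0 h0 hj] at hz
    have ht : (j + 1).toNat = j.toNat + 1 := by omega
    have hjtake : a.take (j.toNat + 1) = a.take j.toNat ++ [a[j.toNat]] := by
      rw [List.take_add_one]
      simp [List.getElem?_eq_getElem hlt]
    have hrec := trimZerosLast_eq a (j - 1) (by omega)
    have ht2 : (j - 1 + 1).toNat = j.toNat := by omega
    rw [ht2] at hrec
    rw [hrec, ht, hjtake]
    simp [hz]
    omega
  case isFalse h =>
    by_cases h0 : 0 ≤ j
    · have hlt : j.toNat < a.length := by omega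
      have hz : ¬ a[j.toNat] = 0 := by
        intro hc
        exact h ⟨h0, by rw [PySem.List.pyGetD_eq_getElem a 0 h0 hj]; exact hc⟩
      have ht : (j + 1).toNat = j.toNat + 1 := by omega
      have hjtake : a.take (j.toNat + 1) = a.take j.toNat ++ [a[j.toNat]] := by
        rw [List.take_add_one]
        simp [List.getElem?_eq_getElem hlt]
      rw [ht, hjtake, List.reverse_append, List.reverse_singleton,
        List.singleton_append, List.takeWhile_cons]
      rw [if_neg (by simpa using hz)]
      simp
    · have ht : (j + 1).toNat = 0 := by omega
      rw [ht]
      simp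
termination_by (j + 1).toNat
decreasing_by omega

-- a list containing a non-zero element is not all zeros
theorem len_takeWhile_zero_ne (xs : List Int) (y : Int) (hy : y ∈ xs) (hy0 : y ≠ 0) :
    ((xs.takeWhile (fun z => z = 0)).length : Nat) ≠ xs.length := by
  intro hc
  have hself : xs.takeWhile (fun z => decide (z = 0)) = xs :=
    (List.takeWhile_prefix _).eq_of_length hc
  have hall := List.takeWhile_eq_self_iff.mp hself
  have := hall y hy
  simp at this
  exact hy0 this

-- B's single pass computes the first and last non-zero positions.
theorem trimZeros_foldl_eq (xs : List Int) (s : Int) (f : Option Int) (l : Int) :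
    (PySem.List.enumerate xs s).foldl trimZerosStep (f, l) =
      if ∃ x ∈ xs, x ≠ 0 then
        (some (f.getD (s + ((xs.takeWhile (fun x => x = 0)).length : Int))),
          s + xs.length - 1 - ((xs.reverse.takeWhile (fun x => x = 0)).length : Int))
      else (f, l) := by
  induction xs generalizing s f l with
  | nil => simp [PySem.List.enumerate_nil]
  | cons x xs ih =>
    rw [PySem.List.enumerate_cons]
    by_cases hx : x = 0
    · have hstep : trimZerosStep (f, l) (s, x) = (f, l) := by
        simp [trimZerosStep, hx]
      rw [List.foldl_cons, hstep, ih]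
      have hmem : (∃ y ∈ x :: xs, y ≠ 0) ↔ (∃ y ∈ xs, y ≠ 0) := by
        simp [hx]
      by_cases hex : ∃ y ∈ xs, y ≠ 0
      · rw [if_pos hex, if_pos (hmem.mpr hex)]
        obtain ⟨y, hy, hy0⟩ := hex
        have hrev : ((x :: xs).reverse.takeWhile (fun z => z = 0)) =
            (xs.reverse.takeWhile (fun z => z = 0)) := by
          rw [List.reverse_cons, List.takeWhile_append]
          rw [if_neg (len_takeWhile_zero_ne xs.reverse y (by simpa using hy) hy0)]
        rw [hrev]
        have htw : ((x :: xs).takeWhile (fun z => z = 0)).length =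
            (xs.takeWhile (fun z => z = 0)).length + 1 := by
          simp [hx]
        rw [htw]
        simp only [Prod.mk.injEq, Option.some.injEq]
        refine ⟨?_, ?_⟩
        · congr 1
          push_cast
          ring
        · simp only [List.length_cons]
          push_cast
          ring
      · rw [if_neg hex, if_neg (fun hc => hex (hmem.mp hc))]
    · have hstep : trimZerosStep (f, l) (s, x) = (some (f.getD s), s) := by
        cases f <;> simp [trimZerosStep, hx]
      rw [List.foldl_cons, hstep, ih]
      have hmem : ∃ y ∈ x :: xs, y ≠ 0 := ⟨x, by simp, hx⟩
      have htw0 : ((x :: xs).takeWhile (fun z => z = 0)).length = 0 := by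
        simp [hx]
      by_cases hex : ∃ y ∈ xs, y ≠ 0
      · rw [if_pos hex, if_pos hmem, htw0]
        obtain ⟨y, hy, hy0⟩ := hex
        have hrev : ((x :: xs).reverse.takeWhile (fun z => z = 0)) =
            (xs.reverse.takeWhile (fun z => z = 0)) := by
          rw [List.reverse_cons, List.takeWhile_append]
          rw [if_neg (len_takeWhile_zero_ne xs.reverse y (by simpa using hy) hy0)]
        rw [hrev]
        simp only [Prod.mk.injEq, Option.some.injEq]
        refine ⟨?_, ?_⟩
        · simp
        · simp only [List.length_cons]
          push_cast
          ring
      · rw [if_neg hex, if_pos hmem, htw0]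
        have hall : ∀ y ∈ xs, y = 0 := by
          intro y hy
          by_contra hc
          exact hex ⟨y, hy, hc⟩
        have hself : (xs.reverse.takeWhile (fun z => z = 0)) = xs.reverse := by
          rw [List.takeWhile_eq_self_iff]
          intro z hz
          simp [hall z (by simpa using hz)]
        have hrev : ((x :: xs).reverse.takeWhile (fun z => z = 0)) = xs.reverse := by
          rw [List.reverse_cons, List.takeWhile_append]
          rw [if_pos (by rw [hself])]
          simp [hx]
        rw [hrev]
        simp only [Prod.mk.injEq, Option.some.injEq]
        refine ⟨?_, ?_⟩
        · simp
        · simp only [List.length_cons, List.length_reverse]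
          push_cast
          ring

-- ===== VERDICT (by name: the statement is the Claim_ definition above) =====
theorem trimZeros_spec : Claim_equal_trimZeros := by
  intro a _
  show trimZeros a = trimZeros_alt a
  simp only [trimZeros, trimZeros_alt]
  rw [trimZeros_foldl_eq a 0 none (-1), trimZerosFirst_eq a 0,
    trimZerosLast_eq a ((a.length : Int) - 1) (by omega)]
  have htake : a.take (((a.length : Int) - 1) + 1).toNat = a := by
    have : (((a.length : Int) - 1) + 1).toNat = a.length := by omega
    rw [this, List.take_length]
  rw [htake, List.drop_zero]
  by_cases hex : ∃ x ∈ a, x ≠ 0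
  · rw [if_pos hex]
    simp only [Option.getD_none]
    push_cast
    ring_nf
  · rw [if_neg hex]
    have hall : ∀ y ∈ a, y = 0 := by
      intro y hy
      by_contra hc
      exact hex ⟨y, hy, hc⟩
    have h1 : (a.takeWhile (fun z => z = 0)) = a := by
      rw [List.takeWhile_eq_self_iff]
      intro z hz
      simp [hall z hz]
    have h2 : (a.reverse.takeWhile (fun z => z = 0)) = a.reverse := by
      rw [List.takeWhile_eq_self_iff]
      intro z hz
      simp [hall z (by simpa using hz)]
    rw [h1, h2]
    simp only [List.length_reverse]
    have e1 : ((a.length : Int) - 1 - (a.length : Int)) + 1 = 0 := by ring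
    rw [e1]
    rw [PySem.List.slice_toNat a (by positivity) (by omega)]
    rw [PySem.List.slice_toNat a (by omega) (by omega)]
    simp
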